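-- pv_equiv track=rewrite | github.com/frdnamalia/Ravel_Knit_Words | ujian3.py | ravel
-- ===== SOURCE A (Python) =====
-- def ravel(x):
--     i=0
--     jum=len(x)
--     temp=''
--     for j in range (jum+1):
--         for i in range(j):
--             temp+= x[i]
--     temp+=''
--     return temp
-- ===== SOURCE B (Python) =====
-- def ravel(x):
--     jum = len(x)
--     prefix = ''
--     temp = ''
--     for j in range(jum):
--         prefix += x[j]
--         temp += prefix
--     return temp
-- ===== Notes on version B (the rewrite author's own statement) =====
-- stated objective: faster
-- what changed: B maintains the growing prefix in a single pass instead of rebuilding every prefix with A's nested loop.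
import Mathlib
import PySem

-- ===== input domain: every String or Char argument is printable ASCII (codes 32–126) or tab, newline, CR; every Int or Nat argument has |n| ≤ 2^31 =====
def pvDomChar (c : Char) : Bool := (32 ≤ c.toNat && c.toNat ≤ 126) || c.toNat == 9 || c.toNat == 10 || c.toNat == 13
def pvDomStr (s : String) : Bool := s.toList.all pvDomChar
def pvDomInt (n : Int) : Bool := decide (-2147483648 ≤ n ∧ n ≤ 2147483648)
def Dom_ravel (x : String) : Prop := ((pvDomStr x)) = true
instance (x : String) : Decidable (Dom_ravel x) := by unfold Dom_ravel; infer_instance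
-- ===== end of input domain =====

-- B maintains the growing prefix in a single pass instead of rebuilding every prefix with A's nested loop.


-- ===== PORT A =====
-- `temp += x[i]`: pyGet? is exact for Python indexing; the none branch appends nothing
-- (unreachable in both loops since the index stays below len(x)).
def pvChAt (l : List Char) (i : Int) : List Char :=
  match PySem.List.pyGet? l i with
  | some c => [c]
  | none => []

def ravel (x : String) : String :=
  let jum : Int := PySem.Str.len x
  let temp : List Char :=
    (PySem.List.pyRange 0 (jum + 1) 1).foldl
      (fun temp j =>
        (PySem.List.pyRange 0 j 1).foldl
          (fun temp i => temp ++ pvChAt x.toList i) temp)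
      []
  String.ofList (temp ++ [])

-- ===== PORT B =====
def ravel_alt (x : String) : String :=
  let jum : Int := PySem.Str.len x
  let st : List Char × List Char :=
    (PySem.List.pyRange 0 jum 1).foldl
      (fun st j =>
        let p := st.1 ++ pvChAt x.toList j
        (p, st.2 ++ p))
      ([], [])
  String.ofList st.2

-- ===== PRECONDITION & SPEC =====
def Spec_ravel (x : String) (out : String) : Prop := out = ravel_alt x
instance (x : String) (out : String) : Decidable (Spec_ravel x out) := by unfold Spec_ravel; infer_instance

-- ===== CLAIM (what is proved, stated in full; the proofs are below) =====
def Claim_equal_ravel : Prop := ∀ (x : String), Dom_ravel x → Spec_ravel x (ravel x)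

-- ===== LEMMAS AND PROOFS =====

theorem pvChAt_of_lt (l : List Char) (n : Nat) (h : n < l.length) :
    pvChAt l (n : Int) = [l[n]] := by
  simp [pvChAt, PySem.List.pyGet?_natCast, List.getElem?_eq_getElem h]

-- A's inner loop builds the prefix l.take n
theorem ravel_inner (l : List Char) (n : Nat) (h : n ≤ l.length) (t : List Char) :
    (List.range n).foldl (fun t (i : Nat) => t ++ pvChAt l (i : Int)) t = t ++ l.take n := by
  induction n generalizing t with
  | zero => simp
  | succ m ih =>
    rw [List.range_succ, List.foldl_append, ih (by omega)]
    simp [pvChAt_of_lt l m (by omega), List.take_add_one]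

-- B's loop invariant: state after n steps = (prefix of length n, concatenation of prefixes 1..n)
theorem ravel_alt_inv (l : List Char) (n : Nat) (h : n ≤ l.length) :
    (List.range n).foldl
        (fun (st : List Char × List Char) (j : Nat) =>
          let p := st.1 ++ pvChAt l (j : Int)
          (p, st.2 ++ p))
        ([], []) =
      (l.take n, (List.range (n + 1)).foldl (fun t (j : Nat) => t ++ l.take j) []) := by
  induction n with
  | zero => simp
  | succ m ih =>
    rw [List.range_succ, List.foldl_append, ih (by omega)]
    rw [show m + 1 + 1 = (m + 1) + 1 from rfl, List.range_succ (n := m + 1), List.foldl_append]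
    simp [pvChAt_of_lt l m (by omega), List.take_add_one]

-- ===== VERDICT (by name: the statement is the Claim_ definition above) =====
theorem ravel_spec : Claim_equal_ravel := by
  intro x _
  unfold Spec_ravel ravel ravel_alt
  set l := x.toList with hl
  have hlen : PySem.Str.len x = (l.length : Int) := by simp [PySem.Str.len_eq, hl]
  simp only [hlen]
  have hcast : ((l.length : Int) + 1) = ((l.length + 1 : Nat) : Int) := by push_cast; ring
  rw [hcast, PySem.List.pyRange_zero_nat, PySem.List.pyRange_zero_nat,
    List.foldl_map, List.foldl_map]
  rw [ravel_alt_inv l l.length le_rfl]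
  have houter :
      (List.range (l.length + 1)).foldl
          (fun temp (j : Nat) =>
            (PySem.List.pyRange 0 (j : Int) 1).foldl
              (fun temp i => temp ++ pvChAt l i) temp)
          [] =
        (List.range (l.length + 1)).foldl (fun t (j : Nat) => t ++ l.take j) [] := by
    apply PySem.List.foldl_congr_mem
    intro acc j hj
    rw [PySem.List.pyRange_zero_nat, List.foldl_map]
    exact ravel_inner l j (by simpa using Nat.lt_succ_iff.mp (List.mem_range.mp hj)) acc
  rw [houter]
  simp
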